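-- pv_equiv track=rewrite | github.com/adam123456-dev/Sparkz-Backend | app/services/analysis_runner.py | _uniform_reason
-- ===== SOURCE A (Python) =====
-- from typing import Any
--
-- def _uniform_reason(check_results: list[dict[str, Any]]) -> str | None:
--     reasons = [str(r.get("reason") or "").strip() for r in check_results]
--     if not reasons:
--         return None
--     first = reasons[0]
--     if first and all(r == first for r in reasons):
--         return first
--     return None
-- ===== SOURCE B (Python) =====
-- def _uniform_reason(check_results):
--     vals = [str(r.get("reason") or "").strip() for r in check_results]
--     if not vals:
--         return None
--     lo, hi = min(vals), max(vals)
--     return lo if lo == hi and lo else None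
-- ===== Notes on version B (the rewrite author's own statement) =====
-- stated objective: alternative
-- what changed: B decides uniformity by order rather than by an anchored equality scan: it takes min(vals) and max(vals) of the normalized reasons and returns the value iff the two extremes coincide and are non-empty, instead of comparing every element against the first.
import Mathlib
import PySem

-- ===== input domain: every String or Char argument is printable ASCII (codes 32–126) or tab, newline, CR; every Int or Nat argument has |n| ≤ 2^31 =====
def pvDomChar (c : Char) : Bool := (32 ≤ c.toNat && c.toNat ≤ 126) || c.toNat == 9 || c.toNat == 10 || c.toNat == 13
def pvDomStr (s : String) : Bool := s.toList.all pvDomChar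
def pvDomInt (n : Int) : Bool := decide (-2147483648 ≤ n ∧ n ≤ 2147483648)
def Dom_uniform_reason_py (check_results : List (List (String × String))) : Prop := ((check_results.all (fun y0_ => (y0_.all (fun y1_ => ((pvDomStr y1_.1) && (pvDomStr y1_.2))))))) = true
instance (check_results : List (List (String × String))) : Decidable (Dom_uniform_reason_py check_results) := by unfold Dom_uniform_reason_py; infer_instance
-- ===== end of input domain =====

-- B decides uniformity by order (min(vals) == max(vals) and non-empty) instead of A's anchored scan against the first element (alternative; same cost).

-- str(r.get("reason") or "").strip() — values are strings here, so 'str(... or "")' is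
-- (get? …).getD "" (a missing key and an empty string both yield ""), then strip.
def pvNormReason (r : List (String × String)) : String :=
  PySem.Str.strip ((PySem.Dict.get? (PySem.Dict.mk r) "reason").getD "")

-- ===== PORT A =====
def uniform_reason_py (check_results : List (List (String × String))) : Option String :=
  let reasons := check_results.map pvNormReason
  match reasons with
  | [] => none
  | first :: _ =>
    if (first != "") && reasons.all (fun r => r == first) then some first else none

-- ===== PORT B =====
def uniform_reason_py_alt (check_results : List (List (String × String))) : Option String :=
  let vals := check_results.map pvNormReason
  if vals = [] then none
  else
    match PySem.List.min? vals (fun x => x), PySem.List.max? vals (fun x => x) with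
    | some lo, some hi => if (lo == hi) && (lo != "") then some lo else none
    | _, _ => none  -- unreachable: vals ≠ []

-- ===== PRECONDITION & SPEC =====
def Spec_uniform_reason_py (check_results : List (List (String × String))) (out : Option String) : Prop := out = uniform_reason_py_alt check_results
instance (check_results : List (List (String × String))) (out : Option String) : Decidable (Spec_uniform_reason_py check_results out) := by unfold Spec_uniform_reason_py; infer_instance

-- ===== CLAIM =====
def Claim_equal_uniform_reason_py : Prop := ∀ (check_results : List (List (String × String))), Dom_uniform_reason_py check_results → Spec_uniform_reason_py check_results (uniform_reason_py check_results)

-- ===== LEMMAS AND PROOFS =====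

-- ===== VERDICT =====
theorem uniform_reason_py_spec : Claim_equal_uniform_reason_py := by
  intro cr _
  unfold Spec_uniform_reason_py uniform_reason_py uniform_reason_py_alt
  cases hm : cr.map pvNormReason with
  | nil => simp
  | cons f t =>
    clear hm
    simp only [reduceCtorEq, if_false]
    cases hlo : PySem.List.min? (f :: t) (fun x => x) with
    | none => exact absurd ((PySem.List.min?_eq_none_iff (f :: t) (fun x => x)).mp hlo) (by simp)
    | some lo =>
      cases hhi : PySem.List.max? (f :: t) (fun x => x) with
      | none => exact absurd ((PySem.List.max?_eq_none_iff (f :: t) (fun x => x)).mp hhi) (by simp)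
      | some hi =>
        have hlomem : lo ∈ f :: t := PySem.List.min?_mem hlo
        have hhimem : hi ∈ f :: t := PySem.List.max?_mem hhi
        have hlomin : ∀ y ∈ f :: t, lo ≤ y := PySem.List.min?_isMin hlo
        have hhimax : ∀ y ∈ f :: t, y ≤ hi := PySem.List.max?_isMax hhi
        by_cases hall : ∀ y ∈ f :: t, y = f
        · have hlof : lo = f := hall lo hlomem
          have hhif : hi = f := hall hi hhimem
          have hAll : ((f :: t).all fun r => r == f) = true := by
            simp only [List.all_eq_true]
            intro r hr; simp [hall r hr]
          rw [hAll, hlof, hhif]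
          by_cases hf : f = "" <;> simp [hf]
        · rw [not_forall] at hall
          obtain ⟨y, hy2⟩ := hall
          rw [Classical.not_imp] at hy2
          obtain ⟨hy, hyne⟩ := hy2
          have hAll : ((f :: t).all fun r => r == f) = false := by
            simp only [List.all_eq_false]
            exact ⟨y, hy, by simp [hyne]⟩
          rw [hAll]
          have hne : lo ≠ hi := by
            intro h
            have hyl : y = lo := le_antisymm (h ▸ hhimax y hy) (hlomin y hy)
            have hfl : f = lo := le_antisymm (h ▸ hhimax f (by simp)) (hlomin f (by simp))
            exact hyne (hyl.trans hfl.symm)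
          simp [hne]
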